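-- pv_equiv track=rewrite | github.com/vassu-v/Tackety | engine/doc_processor.py | _chunk_by_heading
-- ===== SOURCE A (Python) =====
-- from typing import List, Dict, Optional
--
-- def _chunk_by_heading(text: str) -> List[Dict[str, str]]:
--     """
--     Chunks markdown-style text by headers.
--     Returns [{"title": "Header", "content": "Text..."}, ...]
--     """
--     lines = text.split('\n')
--     chunks = []
--     current_title = "General"
--     current_content = []
--
--     for line in lines:
--         if line.startswith('#'):
--             # Save previous chunk
--             if current_content:
--                 chunks.append({
--                     "title": current_title,
--                     "content": "\n".join(current_content).strip()
--                 })
--             current_title = line.lstrip('#').strip()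
--             current_content = []
--         else:
--             current_content.append(line)
--
--     # Save last chunk
--     if current_content:
--          chunks.append({
--             "title": current_title,
--             "content": "\n".join(current_content).strip()
--          })
--
--     return [c for c in chunks if c["content"]] # Filter out empties
-- ===== SOURCE B (Python) =====
-- from typing import List, Dict
--
-- def _split_body(lines):
--     """Longest prefix of non-heading lines, and the remaining lines."""
--     if lines and not lines[0].startswith('#'):
--         body, rest = _split_body(lines[1:])
--         return [lines[0]] + body, rest
--     return [], lines
--
-- def _sections(title, lines):
--     """Recursively decompose lines into one chunk per section."""
--     body, rest = _split_body(lines)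
--     chunk = {"title": title, "content": "\n".join(body).strip()}
--     if not rest:
--         return [chunk]
--     return [chunk] + _sections(rest[0].lstrip('#').strip(), rest[1:])
--
-- def _chunk_by_heading(text: str) -> List[Dict[str, str]]:
--     return [c for c in _sections("General", text.split('\n')) if c["content"]]
-- ===== Notes on version B (the rewrite author's own statement) =====
-- stated objective: alternative
-- what changed: Replaces A's single pass with a mutable accumulator/current-title state and a trailing flush by a recursive section decomposition: split off the longest non-heading prefix as the section body, emit its chunk, recurse on the remainder after the next heading, then filter empty-content chunks.
import Mathlib
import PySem

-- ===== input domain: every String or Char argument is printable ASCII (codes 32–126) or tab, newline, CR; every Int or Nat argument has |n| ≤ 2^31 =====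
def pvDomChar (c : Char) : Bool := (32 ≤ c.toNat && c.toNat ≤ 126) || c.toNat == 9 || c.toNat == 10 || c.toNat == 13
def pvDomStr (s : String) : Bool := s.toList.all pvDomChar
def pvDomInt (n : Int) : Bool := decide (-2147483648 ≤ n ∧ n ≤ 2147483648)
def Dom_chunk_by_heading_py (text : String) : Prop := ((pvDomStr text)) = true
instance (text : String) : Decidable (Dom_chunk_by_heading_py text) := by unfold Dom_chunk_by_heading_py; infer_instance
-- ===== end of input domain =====

-- B replaces A's single stateful accumulator loop by a recursive section decomposition
-- (split off the body before the next heading, emit a chunk, recurse); objective: alternative.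


-- shared by both ports (both Pythons build the same dict literal, test the same truthiness
-- and call the same lstrip('#').strip()):
-- {"title": t, "content": "\n".join(body).strip()} as an assoc list
def pvMkChunk (title : String) (body : List String) : List (String × String) :=
  [("title", title), ("content", PySem.Str.strip (PySem.Str.join "\n" body))]
-- truthiness test `if c["content"]`; List.lookup is first-match, the key is always present
def pvHasContent (c : List (String × String)) : Bool :=
  ((c.lookup "content").getD "") != ""
-- line.lstrip('#'): drop leading '#' characters (exact: lstrip with a one-char set)
def pvLstripHash (s : String) : String :=
  String.ofList (s.toList.dropWhile (· == '#'))

-- ===== PORT A =====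
-- loop body of A's `for line in lines`; the duplicated "save chunk" block is the flush helper
def flushA (st : List (List (String × String)) × String × List String) :
    List (List (String × String)) :=
  if st.2.2 ≠ [] then st.1 ++ [pvMkChunk st.2.1 st.2.2] else st.1

def stepA (st : List (List (String × String)) × String × List String) (line : String) :
    List (List (String × String)) × String × List String :=
  if PySem.Str.startswith line "#" then
    (flushA st, PySem.Str.strip (pvLstripHash line), [])
  else
    (st.1, st.2.1, st.2.2 ++ [line])

def chunk_by_heading_py (text : String) : List (List (String × String)) :=
  -- text.split('\n'); the separator is non-empty so split? is always `some`
  let lines := (PySem.Str.split? text "\n").getD []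
  (flushA (lines.foldl stepA ([], "General", []))).filter pvHasContent

-- ===== PORT B =====
-- _split_body: longest prefix of non-heading lines, and the rest
def splitBodyB : List String → List String × List String
  | [] => ([], [])
  | l :: ls =>
    if ¬ (PySem.Str.startswith l "#") then
      ((l :: (splitBodyB ls).1), (splitBodyB ls).2)
    else ([], l :: ls)

theorem splitBodyB_snd_len (ls : List String) : (splitBodyB ls).2.length ≤ ls.length := by
  induction ls with
  | nil => simp [splitBodyB]
  | cons l ls ih =>
    simp only [splitBodyB]
    split
    · simpa using Nat.le_succ_of_le ih
    · simp

-- _sections: one chunk per section, recursing past each heading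
def sectionsB (title : String) (lines : List String) : List (List (String × String)) :=
  match h : (splitBodyB lines).2 with
  | [] => [pvMkChunk title (splitBodyB lines).1]
  | r :: rest =>
    pvMkChunk title (splitBodyB lines).1 ::
      sectionsB (PySem.Str.strip (pvLstripHash r)) rest
termination_by lines.length
decreasing_by
  have := splitBodyB_snd_len lines
  rw [h] at this
  simp at this
  omega

def chunk_by_heading_py_alt (text : String) : List (List (String × String)) :=
  (sectionsB "General" ((PySem.Str.split? text "\n").getD [])).filter pvHasContent

-- ===== PRECONDITION & SPEC =====
def Spec_chunk_by_heading_py (text : String) (out : List (List (String × String))) : Prop := out = chunk_by_heading_py_alt text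
instance (text : String) (out : List (List (String × String))) : Decidable (Spec_chunk_by_heading_py text out) := by unfold Spec_chunk_by_heading_py; infer_instance

-- ===== CLAIM (what is proved, stated in full; the proofs are below) =====
def Claim_equal_chunk_by_heading_py : Prop := ∀ (text : String), Dom_chunk_by_heading_py text → Spec_chunk_by_heading_py text (chunk_by_heading_py text)

-- ===== LEMMAS AND PROOFS =====

-- a chunk with empty body has empty content and is filtered out
theorem hasContent_nil (t : String) : pvHasContent (pvMkChunk t []) = false := by
  have hlk : (pvMkChunk t []).lookup "content"
      = some (PySem.Str.strip (PySem.Str.join "\n" [])) := by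
    simp only [pvMkChunk]
    rfl
  simp only [pvHasContent, hlk]
  decide

theorem splitBodyB_append (acc ls : List String)
    (h : ∀ l ∈ acc, PySem.Str.startswith l "#" = false) :
    splitBodyB (acc ++ ls) = (acc ++ (splitBodyB ls).1, (splitBodyB ls).2) := by
  induction acc with
  | nil => simp
  | cons a acc ih =>
    have ha : PySem.Str.startswith a "#" = false := h a (List.mem_cons_self ..)
    simp only [List.cons_append, splitBodyB, ha]
    rw [ih (fun l hl => h l (List.mem_cons_of_mem _ hl))]
    simp

theorem sectionsB_of_nil (title : String) (lines : List String)
    (h : (splitBodyB lines).2 = []) :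
    sectionsB title lines = [pvMkChunk title (splitBodyB lines).1] := by
  rw [sectionsB]
  split
  · rfl
  · next r rest heq => rw [heq] at h; exact absurd h (by simp)

theorem sectionsB_of_cons (title : String) (lines : List String) (r : String)
    (rest : List String) (h : (splitBodyB lines).2 = r :: rest) :
    sectionsB title lines =
      pvMkChunk title (splitBodyB lines).1 ::
        sectionsB (PySem.Str.strip (pvLstripHash r)) rest := by
  rw [sectionsB]
  split
  · next heq => rw [heq] at h; exact absurd h (by simp)
  · next r' rest' heq =>
    rw [heq] at h
    injection h with h1 h2
    subst h1; subst h2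
    rfl

-- filtering the flushed chunk equals filtering the always-emitted chunk
theorem filter_flush (chunks : List (List (String × String))) (title : String)
    (acc : List String) (X : List (List (String × String))) :
    (flushA (chunks, title, acc) ++ X).filter pvHasContent
      = (chunks ++ pvMkChunk title acc :: X).filter pvHasContent := by
  by_cases hacc : acc = []
  · subst hacc
    simp [flushA, List.filter_append, hasContent_nil]
  · simp [flushA, hacc, List.filter_append, List.filter_cons]

theorem loop_sections (ls : List String) :
    ∀ (chunks : List (List (String × String))) (title : String) (acc : List String),
    (∀ l ∈ acc, PySem.Str.startswith l "#" = false) →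
    (flushA (List.foldl stepA (chunks, title, acc) ls)).filter pvHasContent
      = (chunks ++ sectionsB title (acc ++ ls)).filter pvHasContent := by
  induction ls with
  | nil =>
    intro chunks title acc h
    have hsb : splitBodyB acc = (acc, []) := by
      have := splitBodyB_append acc [] h
      simpa [splitBodyB] using this
    rw [List.foldl_nil, List.append_nil,
      sectionsB_of_nil title acc (by rw [hsb]), hsb]
    have := filter_flush chunks title acc []
    simpa using this
  | cons l ls ih =>
    intro chunks title acc h
    rw [List.foldl_cons]
    by_cases hl : PySem.Str.startswith l "#" = true
    · have hl2 : PySem.Chars.startswith l.toList ['#'] = true := by simpa using hl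
      have hsb : splitBodyB (acc ++ l :: ls) = (acc, l :: ls) := by
        rw [splitBodyB_append acc (l :: ls) h]
        simp [splitBodyB, hl2]
      rw [show stepA (chunks, title, acc) l
            = (flushA (chunks, title, acc), PySem.Str.strip (pvLstripHash l), []) by
          simp [stepA, hl2],
        ih _ _ [] (by simp),
        sectionsB_of_cons title (acc ++ l :: ls) l ls (by rw [hsb]), hsb]
      simp only [List.nil_append]
      exact filter_flush chunks title acc _
    · have hl2 : PySem.Chars.startswith l.toList ['#'] = false := by
        simpa using hl
      rw [show stepA (chunks, title, acc) l = (chunks, title, acc ++ [l]) by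
          simp [stepA, hl2]]
      rw [ih chunks title (acc ++ [l])
        (by intro x hx
            rcases List.mem_append.1 hx with hx | hx
            · exact h x hx
            · simp at hx; subst hx; simpa using hl2)]
      simp

-- ===== VERDICT (by name: the statement is the Claim_ definition above) =====
theorem chunk_by_heading_py_spec : Claim_equal_chunk_by_heading_py := by
  intro text _
  show chunk_by_heading_py text = chunk_by_heading_py_alt text
  unfold chunk_by_heading_py chunk_by_heading_py_alt
  simpa using loop_sections ((PySem.Str.split? text "\n").getD []) [] "General" [] (by simp)
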